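-- pv_equiv track=rewrite | github.com/Vedantimarne1301/ai-road-risk-intelligence | backend/services/safetyai.py | format_junction_response
-- ===== SOURCE A (Python) =====
-- from typing import Dict, List, Any, Optional
--
-- def format_junction_response(data: Dict[str, Any]) -> str:
--     """Format junction analysis response"""
--     if "error" in data:
--         return "Junction data is not available in the dataset."
--
--     total_accidents = sum(v['accident_count'] for v in data.values())
--
--     response = "Junction Safety Analysis\n\n"
--     response += f"Total Junction-Related Accidents: {total_accidents:,}\n\n"
--
--     sorted_junctions = sorted(data.items(), key=lambda x: x[1]['accident_count'], reverse=True)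
--
--     if sorted_junctions:
--         top_junction = sorted_junctions[0]
--         response += f"Highest Risk: Junction type {top_junction[0]} with {top_junction[1]['accident_count']:,} accidents\n"
--
--     response += "\nSafety Recommendation: Special attention needed at high-risk junction types."
--
--     return response
-- ===== SOURCE B (Python) =====
-- def format_junction_response(data):
--     """Format junction analysis response (single fused pass: total and top computed together)"""
--     if "error" in data:
--         return "Junction data is not available in the dataset."
--
--     total_accidents = 0
--     top = None
--     for name, v in data.items():
--         c = v['accident_count']
--         total_accidents += c
--         if top is None or c > top[1]:
--             top = (name, c)
--
--     response = "Junction Safety Analysis\n\n"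
--     response += f"Total Junction-Related Accidents: {total_accidents:,}\n\n"
--     if top is not None:
--         response += f"Highest Risk: Junction type {top[0]} with {top[1]:,} accidents\n"
--     response += "\nSafety Recommendation: Special attention needed at high-risk junction types."
--     return response
-- ===== Notes on version B (the rewrite author's own statement) =====
-- stated objective: alternative
-- what changed: A sums the counts with a generator and then sorts all items descending to take the first; B makes one fused pass that accumulates the total and the first maximal junction together, with no sort.
import Mathlib
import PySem

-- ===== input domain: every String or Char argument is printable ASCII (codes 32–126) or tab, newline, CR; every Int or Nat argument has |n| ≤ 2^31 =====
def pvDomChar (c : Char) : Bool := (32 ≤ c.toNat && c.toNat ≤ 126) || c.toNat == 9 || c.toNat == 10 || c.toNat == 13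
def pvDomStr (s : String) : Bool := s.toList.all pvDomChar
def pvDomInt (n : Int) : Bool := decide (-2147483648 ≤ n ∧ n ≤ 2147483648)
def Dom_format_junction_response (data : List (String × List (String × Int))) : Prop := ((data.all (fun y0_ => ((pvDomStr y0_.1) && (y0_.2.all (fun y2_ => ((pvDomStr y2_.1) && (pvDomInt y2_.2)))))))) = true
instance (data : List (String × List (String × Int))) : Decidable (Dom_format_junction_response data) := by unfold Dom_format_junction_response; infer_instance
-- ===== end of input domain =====

-- B replaces A's sort-then-take-first by a single fused loop that accumulates the total and the
-- first maximal junction together (alternative/simpler: one O(n) pass instead of sum + O(n log n) sort).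

-- ===== PORT A =====
-- shared formatting helper: Python's f"{n:,}" (thousands separator); hand-ported (no PySem primitive),
-- exact for all Int: digits of |n| grouped in threes from the right, '-' in front for negatives.
def fjrGroup3 : List Char → List Char
  | a :: b :: c :: d :: t => a :: b :: c :: ',' :: fjrGroup3 (d :: t)
  | l => l

def fjrComma (n : Int) : String :=
  (if n < 0 then "-" else "") ++ String.ofList ((fjrGroup3 (PySem.Int.toStr (n.natAbs : Int)).toList.reverse).reverse)

-- the inner dict lookup v['accident_count'] (0 is junk outside Pre_, where Python raises KeyError)
def fjrCount (v : List (String × Int)) : Int := (PySem.Dict.ofList v).getD "accident_count" 0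

def format_junction_response (data : List (String × List (String × Int))) : String :=
  let d := PySem.Dict.ofList data
  if d.contains "error" then "Junction data is not available in the dataset."
  else
    let total_accidents : Int := (d.values.map (fun v => fjrCount v)).sum
    let response := "Junction Safety Analysis\n\n" ++ "Total Junction-Related Accidents: " ++ fjrComma total_accidents ++ "\n\n"
    let sorted_junctions := PySem.List.sorted d.items (fun x => fjrCount x.2) true
    let response := match sorted_junctions with
      | top_junction :: _ =>
          response ++ "Highest Risk: Junction type " ++ top_junction.1 ++ " with " ++ fjrComma (fjrCount top_junction.2) ++ " accidents\n"
      | [] => response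
    response ++ "\nSafety Recommendation: Special attention needed at high-risk junction types."

-- ===== PORT B =====
def format_junction_response_alt (data : List (String × List (String × Int))) : String :=
  let d := PySem.Dict.ofList data
  if d.contains "error" then "Junction data is not available in the dataset."
  else
    let st := d.items.foldl
      (fun (st : Int × Option (String × Int)) p =>
        let c := fjrCount p.2
        (st.1 + c,
         match st.2 with
         | none => some (p.1, c)
         | some t => if c > t.2 then some (p.1, c) else some t))
      ((0 : Int), (none : Option (String × Int)))
    let response := "Junction Safety Analysis\n\n" ++ "Total Junction-Related Accidents: " ++ fjrComma st.1 ++ "\n\n"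
    let response := match st.2 with
      | some top => response ++ "Highest Risk: Junction type " ++ top.1 ++ " with " ++ fjrComma top.2 ++ " accidents\n"
      | none => response
    response ++ "\nSafety Recommendation: Special attention needed at high-risk junction types."

-- ===== PRECONDITION & SPEC =====
-- Pre_ excludes exactly the inputs where Python A raises KeyError: no "error" key and some value
-- (that survives dict deduplication) lacks the 'accident_count' key.
def Pre_format_junction_response (data : List (String × List (String × Int))) : Prop :=
  ("error" ∈ data.map Prod.fst) ∨ ∀ p ∈ (PySem.Dict.ofList data).items, "accident_count" ∈ p.2.map Prod.fst
instance (data : List (String × List (String × Int))) : Decidable (Pre_format_junction_response data) := by unfold Pre_format_junction_response; infer_instance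

def pvWitness_format_junction_response : (List (String × List (String × Int))) :=
  [("A", [("accident_count", (3 : Int))]), ("B", [("accident_count", (7 : Int))])]

def Spec_format_junction_response (data : List (String × List (String × Int))) (out : String) : Prop := out = format_junction_response_alt data
instance (data : List (String × List (String × Int))) (out : String) : Decidable (Spec_format_junction_response data out) := by unfold Spec_format_junction_response; infer_instance

-- ===== CLAIM (what is proved, stated in full; the proofs are below) =====
def Claim_equal_format_junction_response : Prop := ∀ (data : List (String × List (String × Int))), Dom_format_junction_response data → Pre_format_junction_response data → Spec_format_junction_response data (format_junction_response data)

-- ===== LEMMAS AND PROOFS =====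

-- B's fused fold splits into the running total and Python's first-max step (the latter tagged
-- with its key value); fjrMaxStep names the first-max accumulator step.
def fjrTag (p : String × List (String × Int)) : String × Int := (p.1, fjrCount p.2)

def fjrMaxStep (acc : Option (String × List (String × Int))) (x : String × List (String × Int)) :
    Option (String × List (String × Int)) :=
  match acc with
  | none => some x
  | some m => if fjrCount m.2 < fjrCount x.2 then some x else some m

lemma fjr_fold_split (l : List (String × List (String × Int))) :
    ∀ (t0 : Int) (m0 : Option (String × List (String × Int))),
    l.foldl
      (fun (st : Int × Option (String × Int)) p =>
        let c := fjrCount p.2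
        (st.1 + c,
         match st.2 with
         | none => some (p.1, c)
         | some t => if c > t.2 then some (p.1, c) else some t))
      (t0, m0.map fjrTag)
    = (t0 + (l.map (fun p => fjrCount p.2)).sum, (l.foldl fjrMaxStep m0).map fjrTag) := by
  induction l with
  | nil => intro t0 m0; simp
  | cons p l ih =>
      intro t0 m0
      cases m0 with
      | none =>
          have h := ih (t0 + fjrCount p.2) (some p)
          simpa [fjrTag, fjrMaxStep, add_assoc] using h
      | some m =>
          by_cases h : fjrCount m.2 < fjrCount p.2
          · have := ih (t0 + fjrCount p.2) (some p)
            simp only [List.foldl_cons, Option.map_some, fjrTag, fjrMaxStep] at this ⊢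
            simp [h, this, add_assoc]
          · have := ih (t0 + fjrCount p.2) (some m)
            simp only [List.foldl_cons, Option.map_some, fjrTag, fjrMaxStep] at this ⊢
            simp [h, this, add_assoc]

-- head of insertBy (descending predicate) is the running-max step
lemma fjr_head_insertBy (x : String × List (String × Int)) (acc : List (String × List (String × Int))) :
    (PySem.List.insertBy (fun a b => decide (fjrCount b.2 < fjrCount a.2)) x acc).head?
    = fjrMaxStep acc.head? x := by
  cases acc with
  | nil => simp [PySem.List.insertBy, fjrMaxStep]
  | cons y ys =>
      by_cases h : fjrCount y.2 < fjrCount x.2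
      · simp [PySem.List.insertBy, fjrMaxStep, h]
      · simp [PySem.List.insertBy, fjrMaxStep, h]

lemma fjr_head_foldl (xs : List (String × List (String × Int))) :
    ∀ (acc : List (String × List (String × Int))),
    (xs.foldl (fun acc x => PySem.List.insertBy (fun a b => decide (fjrCount b.2 < fjrCount a.2)) x acc) acc).head?
    = xs.foldl fjrMaxStep acc.head? := by
  induction xs with
  | nil => intro acc; rfl
  | cons x xs ih =>
      intro acc
      simp only [List.foldl_cons]
      rw [ih, fjr_head_insertBy]

-- head of Python's stable reverse sort = the running first-max fold (Python's max with a key)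
lemma fjr_sorted_head (xs : List (String × List (String × Int))) :
    (PySem.List.sorted xs (fun x => fjrCount x.2) true).head? = xs.foldl fjrMaxStep none := by
  rw [PySem.List.sorted_rev_eq_foldl_insertBy]
  exact fjr_head_foldl xs []

-- ===== VERDICT (by name: the statement is the Claim_ definition above) =====
theorem format_junction_response_spec : Claim_equal_format_junction_response := by
  intro data _ _
  unfold Spec_format_junction_response format_junction_response format_junction_response_alt
  set d := PySem.Dict.ofList data with hd
  by_cases herr : d.contains "error"
  · simp [herr]
  · simp only [herr, Bool.false_eq_true, if_false]
    have hsplit := fjr_fold_split d.items 0 none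
    simp only [Option.map_none, zero_add] at hsplit
    rw [hsplit]
    have hvals : d.values = d.items.map Prod.snd := rfl
    rw [hvals, List.map_map]
    rw [← fjr_sorted_head d.items]
    cases hs : PySem.List.sorted d.items (fun x => fjrCount x.2) true with
    | nil => simp [Function.comp_def]
    | cons top rest => simp [Function.comp_def, fjrTag]
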